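-- pv_equiv track=rewrite | github.com/luceinaltis/Algorithm-study | HackerRank_Hackerland_Radio_Transmitters.py | getMinTransmitters
-- ===== SOURCE A (Python) =====
-- def lowerBound(x, val):
--     l = 0
--     r = len(x)
--     while l < r:
--         mid = (l+r)//2
--         if x[mid] < val:
--             l = mid + 1
--         else:
--             r = mid
--     return l
--
-- def getMinTransmitters(x, n, k):
--     installCnt = 0
--     idx = 0
--     while idx < len(x):
--         installIndex = lowerBound(x, x[idx]+k+1) - 1
--         installCnt += 1
--
--         nextIdx = lowerBound(x, x[installIndex]+k+1)
--         idx = nextIdx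
--     return installCnt
-- ===== SOURCE B (Python) =====
-- def getMinTransmitters(x, n, k):
--     m = len(x)
--     cnt = 0
--     i = 0
--     while i < m:
--         cnt += 1
--         loc = x[i] + k
--         while i < m and x[i] <= loc:
--             i += 1
--         t = x[i - 1]
--         while i < m and x[i] <= t + k:
--             i += 1
--     return cnt
-- ===== Notes on version B (the rewrite author's own statement) =====
-- stated objective: alternative
-- what changed: A re-runs a hand-written binary search (lowerBound) twice per transmitter; B makes a single linear two-pointer sweep over the sorted positions, advancing one index monotonically with no binary search at all.
-- outside the precondition, e.g. on getMinTransmitters([-2, 3, 0, -1], 4, 3): A returns 1, B returns 2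
import Mathlib
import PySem

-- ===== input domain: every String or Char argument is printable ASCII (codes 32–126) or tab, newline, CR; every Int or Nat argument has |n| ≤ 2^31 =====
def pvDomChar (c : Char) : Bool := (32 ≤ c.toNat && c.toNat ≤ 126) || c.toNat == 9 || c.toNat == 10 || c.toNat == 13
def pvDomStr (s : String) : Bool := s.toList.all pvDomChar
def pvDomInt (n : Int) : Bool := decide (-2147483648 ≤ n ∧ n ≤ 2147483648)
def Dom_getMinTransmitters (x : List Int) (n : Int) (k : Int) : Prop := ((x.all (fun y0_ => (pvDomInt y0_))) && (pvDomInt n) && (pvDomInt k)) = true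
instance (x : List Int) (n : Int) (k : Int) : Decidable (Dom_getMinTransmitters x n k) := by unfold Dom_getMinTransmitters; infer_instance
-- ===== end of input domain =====

-- B replaces A's per-transmitter binary searches by one linear two-pointer sweep over the
-- sorted positions (a different algorithm; intended as the O(n) variant, not timed here).

-- ===== PORT A =====
-- A's hand-written binary search `lowerBound`.  The `.getD 0` fallback is a totality guard
-- only: in every call 0 ≤ l ≤ mid < r ≤ len, so the index is in range.
def lowerBoundGo (x : List Int) (val l r : Int) : Int :=
  if l < r then
    if (PySem.List.pyGet? x (PySem.Int.floordiv (l + r) 2)).getD 0 < val then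
      lowerBoundGo x val (PySem.Int.floordiv (l + r) 2 + 1) r
    else
      lowerBoundGo x val l (PySem.Int.floordiv (l + r) 2)
  else l
termination_by (r - l).toNat
decreasing_by
  · have h1 := PySem.Int.floordiv_two_mid_bounds (lo := l) (hi := r) (by omega)
    omega
  · have h1 := PySem.Int.floordiv_two_mid_bounds (lo := l) (hi := r) (by omega)
    have h2 : PySem.Int.floordiv (l + r) 2 < r := by
      rw [PySem.Int.floordiv_lt_iff_lt_mul (by omega)]; omega
    omega

def lowerBound (x : List Int) (val : Int) : Int := lowerBoundGo x val 0 (x.length : Int)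

-- A's `while idx < len(x)` loop, with a fuel guard for totality (under Pre_ the index strictly
-- increases each iteration, so `x.length + 1` fuel is never exhausted; outside Pre_ the Python
-- loop can run forever).  The `none` branches are unreachable totality guards.
def getMinTransmittersLoop (x : List Int) (k : Int) : Nat → Int → Int → Int
  | 0, _, c => c
  | fuel + 1, idx, c =>
    if idx < (x.length : Int) then
      match PySem.List.pyGet? x idx with
      | none => c
      | some xi =>
        match PySem.List.pyGet? x (lowerBound x (xi + k + 1) - 1) with
        | none => c + 1
        | some xj => getMinTransmittersLoop x k fuel (lowerBound x (xj + k + 1)) (c + 1)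
    else c

def getMinTransmitters (x : List Int) (n : Int) (k : Int) : Int :=
  getMinTransmittersLoop x k (x.length + 1) 0 0

-- ===== PORT B =====
-- `while i < m and x[i] <= bound: i += 1` (the guard `i < m` makes this terminating as is).
def skipLoop (x : List Int) (bound i : Int) : Int :=
  if i < (x.length : Int) then
    if (PySem.List.pyGet? x i).getD 0 ≤ bound then skipLoop x bound (i + 1) else i
  else i
termination_by ((x.length : Int) - i).toNat

-- B's outer while loop, same fuel guard as A's port.
def getMinTransmittersAltLoop (x : List Int) (k : Int) : Nat → Int → Int → Int
  | 0, _, c => c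
  | fuel + 1, i, c =>
    if i < (x.length : Int) then
      match PySem.List.pyGet? x i with
      | none => c
      | some xi =>
        match PySem.List.pyGet? x (skipLoop x (xi + k) i - 1) with
        | none => c + 1
        | some t => getMinTransmittersAltLoop x k fuel (skipLoop x (t + k) (skipLoop x (xi + k) i)) (c + 1)
    else c

def getMinTransmitters_alt (x : List Int) (n : Int) (k : Int) : Int :=
  getMinTransmittersAltLoop x k (x.length + 1) 0 0

-- ===== PRECONDITION & SPEC =====
-- Pre_ excludes unsorted x and (for nonempty x) negative k: there A's binary-search greedy is
-- meaningless — it loops forever on many such inputs and returns an accidental value on others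
-- (the HackerRank problem guarantees sorted positions and k ≥ 0).
def Pre_getMinTransmitters (x : List Int) (n : Int) (k : Int) : Prop :=
  x.Pairwise (· ≤ ·) ∧ (x = [] ∨ 0 ≤ k)
instance (x : List Int) (n : Int) (k : Int) : Decidable (Pre_getMinTransmitters x n k) := by
  unfold Pre_getMinTransmitters; infer_instance

def pvWitness_getMinTransmitters : List Int × Int × Int := ([1, 2, 3, 4, 5], 5, 1)

def Spec_getMinTransmitters (x : List Int) (n : Int) (k : Int) (out : Int) : Prop := out = getMinTransmitters_alt x n k
instance (x : List Int) (n : Int) (k : Int) (out : Int) : Decidable (Spec_getMinTransmitters x n k out) := by unfold Spec_getMinTransmitters; infer_instance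

-- ===== CLAIM (what is proved, stated in full; the proofs are below) =====
def Claim_equal_getMinTransmitters : Prop := ∀ (x : List Int) (n : Int) (k : Int), Dom_getMinTransmitters x n k → Pre_getMinTransmitters x n k → Spec_getMinTransmitters x n k (getMinTransmitters x n k)

-- ===== LEMMAS AND PROOFS =====

-- sorted access
lemma sorted_getElem_le (x : List Int) (hs : x.Pairwise (· ≤ ·)) (i j : Nat)
    (hij : i ≤ j) (hj : j < x.length) : x[i] ≤ x[j] := by
  rcases Nat.lt_or_eq_of_le hij with h | h
  · exact (List.pairwise_iff_getElem.mp hs) i j (by omega) hj h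
  · subst h; exact le_refl _

-- A's binary search computes the first index whose element satisfies the predicate `v ≤ ·`.
lemma lowerBoundGo_eq (x : List Int) (v : Int) (hs : x.Pairwise (· ≤ ·)) (l r : Int) :
    0 ≤ l → l ≤ (x.findIdx (fun a => decide (v ≤ a)) : Int) →
    (x.findIdx (fun a => decide (v ≤ a)) : Int) ≤ r → r ≤ (x.length : Int) →
    lowerBoundGo x v l r = (x.findIdx (fun a => decide (v ≤ a)) : Int) := by
  induction l, r using lowerBoundGo.induct x v with
  | case1 l r hlt hpred ih =>
    intro h0 hlF hFr hr
    have hmid := PySem.Int.floordiv_two_mid_bounds (lo := l) (hi := r) (by omega)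
    have hmidr : PySem.Int.floordiv (l + r) 2 < r := by
      rw [PySem.Int.floordiv_lt_iff_lt_mul (by omega)]; omega
    rw [lowerBoundGo, if_pos hlt, if_pos hpred]
    set m := PySem.Int.floordiv (l + r) 2 with hm
    set F := x.findIdx (fun a => decide (v ≤ a)) with hF
    have hget : PySem.List.pyGet? x m = some x[m.toNat] :=
      PySem.List.pyGet?_eq_some_getElem x (by omega) (by omega)
    rw [hget] at hpred
    simp only [Option.getD_some] at hpred
    apply ih ?_ ?_ hFr hr
    · omega
    · by_contra hcon
      push Not at hcon
      have hFlen : F < x.length := by omega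
      have hp : v ≤ x[F] := of_decide_eq_true (List.findIdx_getElem (w := hFlen))
      have hle : x[F] ≤ x[m.toNat] := sorted_getElem_le x hs F m.toNat (by omega) (by omega)
      omega
  | case2 l r hlt hpred ih =>
    intro h0 hlF hFr hr
    have hmid := PySem.Int.floordiv_two_mid_bounds (lo := l) (hi := r) (by omega)
    have hmidr : PySem.Int.floordiv (l + r) 2 < r := by
      rw [PySem.Int.floordiv_lt_iff_lt_mul (by omega)]; omega
    rw [lowerBoundGo, if_pos hlt, if_neg hpred]
    set m := PySem.Int.floordiv (l + r) 2 with hm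
    set F := x.findIdx (fun a => decide (v ≤ a)) with hF
    have hget : PySem.List.pyGet? x m = some x[m.toNat] :=
      PySem.List.pyGet?_eq_some_getElem x (by omega) (by omega)
    rw [hget] at hpred
    simp only [Option.getD_some, not_lt] at hpred
    have hFm : F ≤ m.toNat := by
      by_contra hcon
      push Not at hcon
      have := List.not_of_lt_findIdx (p := fun a => decide (v ≤ a)) (xs := x) (i := m.toNat) (show m.toNat < F by omega)
      simp only [decide_eq_false_iff_not, not_le] at this
      omega
    exact ih h0 hlF (by omega) (by omega)
  | case3 l r hnlt =>
    intro h0 hlF hFr hr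
    rw [lowerBoundGo, if_neg hnlt]
    omega

lemma lowerBound_eq (x : List Int) (v : Int) (hs : x.Pairwise (· ≤ ·)) :
    lowerBound x v = (x.findIdx (fun a => decide (v ≤ a)) : Int) := by
  have hle : x.findIdx (fun a => decide (v ≤ a)) ≤ x.length := List.findIdx_le_length
  exact lowerBoundGo_eq x v hs 0 (x.length : Int) (by omega) (by omega) (by exact_mod_cast hle) (by omega)

-- B's linear skip computes the first index whose element satisfies `b < ·` (no sortedness needed,
-- only that the predicate is false before the start index).
lemma skipLoop_eq (x : List Int) (b : Int) (i : Int) :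
    0 ≤ i → i ≤ (x.findIdx (fun a => decide (b < a)) : Int) →
    skipLoop x b i = (x.findIdx (fun a => decide (b < a)) : Int) := by
  induction i using skipLoop.induct x b with
  | case1 i hlt hle ih =>
    intro h0 hiF
    rw [skipLoop, if_pos hlt, if_pos hle]
    set F := x.findIdx (fun a => decide (b < a)) with hF
    have hget : PySem.List.pyGet? x i = some x[i.toNat] :=
      PySem.List.pyGet?_eq_some_getElem x h0 (by omega)
    rw [hget] at hle
    simp only [Option.getD_some] at hle
    apply ih ?_ ?_
    · omega
    · -- i < F: i ≤ F and i ≠ F since the predicate is false at i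
      rcases lt_or_eq_of_le hiF with h | h
      · omega
      · exfalso
        have hFlen : F < x.length := by omega
        have hp : b < x[F] := of_decide_eq_true (List.findIdx_getElem (w := hFlen))
        have : (F : Int) = i := h.symm
        have : x[F] = x[i.toNat] := by congr 1; omega
        omega
  | case2 i hlt hnle =>
    intro h0 hiF
    rw [skipLoop, if_pos hlt, if_neg hnle]
    set F := x.findIdx (fun a => decide (b < a)) with hF
    have hget : PySem.List.pyGet? x i = some x[i.toNat] :=
      PySem.List.pyGet?_eq_some_getElem x h0 (by omega)
    rw [hget] at hnle
    simp only [Option.getD_some, not_le] at hnle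
    have hFi : F ≤ i.toNat := by
      by_contra hcon
      push Not at hcon
      have := List.not_of_lt_findIdx (p := fun a => decide (b < a)) (xs := x) (i := i.toNat) (show i.toNat < F by omega)
      simp only [decide_eq_false_iff_not, not_lt] at this
      omega
    omega
  | case3 i hnlt =>
    intro h0 hiF
    rw [skipLoop, if_neg hnlt]
    have := List.findIdx_le_length (p := fun a => decide (b < a)) (xs := x)
    omega

-- one step of each loop lands on the same next index, so the loops agree for every fuel
lemma loops_eq (x : List Int) (k : Int) (hs : x.Pairwise (· ≤ ·)) (hk : 0 ≤ k) :
    ∀ (fuel : Nat) (idx c : Int), 0 ≤ idx →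
      getMinTransmittersLoop x k fuel idx c = getMinTransmittersAltLoop x k fuel idx c := by
  intro fuel
  induction fuel with
  | zero => intro idx c _; rfl
  | succ fuel ih =>
    intro idx c h0
    by_cases hlt : idx < (x.length : Int)
    · have hidx : PySem.List.pyGet? x idx = some x[idx.toNat] :=
        PySem.List.pyGet?_eq_some_getElem x h0 (by omega)
      simp only [getMinTransmittersLoop, getMinTransmittersAltLoop, if_pos hlt, hidx]
      set xi := x[idx.toNat] with hxi
      set F1 := x.findIdx (fun a => decide (xi + k + 1 ≤ a)) with hF1
      have hPQ : (fun a => decide (xi + k < a)) = (fun a => decide (xi + k + 1 ≤ a)) :=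
        funext fun a => decide_eq_decide.mpr (by omega)
      have hF1le : F1 ≤ x.length := by rw [hF1]; exact List.findIdx_le_length
      have hlb1 : lowerBound x (xi + k + 1) = (F1 : Int) := lowerBound_eq x _ hs
      have hidxF1 : idx < (F1 : Int) := by
        by_contra hcon
        push Not at hcon
        have hF1len : F1 < x.length := by omega
        have hp : xi + k + 1 ≤ x[F1] := of_decide_eq_true (List.findIdx_getElem (w := hF1len))
        have hle : x[F1] ≤ x[idx.toNat] := sorted_getElem_le x hs F1 idx.toNat (by omega) (by omega)
        omega
      have hsk1 : skipLoop x (xi + k) idx = (F1 : Int) := by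
        have := skipLoop_eq x (xi + k) idx h0 (by rw [hPQ, ← hF1]; omega)
        rwa [hPQ, ← hF1] at this
      have hgetj : PySem.List.pyGet? x ((F1 : Int) - 1) = some x[F1 - 1] := by
        have h1 : ((F1 : Int) - 1) = ((F1 - 1 : Nat) : Int) := by omega
        rw [h1, PySem.List.pyGet?_natCast]
        exact List.getElem?_eq_getElem (by omega)
      simp only [hlb1, hsk1, hgetj]
      set xj := x[F1 - 1] with hxj
      set F2 := x.findIdx (fun a => decide (xj + k + 1 ≤ a)) with hF2
      have hPQ2 : (fun a => decide (xj + k < a)) = (fun a => decide (xj + k + 1 ≤ a)) :=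
        funext fun a => decide_eq_decide.mpr (by omega)
      have hlb2 : lowerBound x (xj + k + 1) = (F2 : Int) := lowerBound_eq x _ hs
      have hF1F2 : (F1 : Int) ≤ (F2 : Int) := by
        by_contra hcon
        push Not at hcon
        have hF2len : F2 < x.length := by omega
        have hp : xj + k + 1 ≤ x[F2] := of_decide_eq_true (List.findIdx_getElem (w := hF2len))
        have hle : x[F2] ≤ x[F1 - 1] := sorted_getElem_le x hs F2 (F1 - 1) (by omega) (by omega)
        omega
      have hsk2 : skipLoop x (xj + k) (F1 : Int) = (F2 : Int) := by
        have := skipLoop_eq x (xj + k) (F1 : Int) (by omega) (by rw [hPQ2, ← hF2]; omega)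
        rwa [hPQ2, ← hF2] at this
      simp only [hlb2, hsk2]
      exact ih (F2 : Int) (c + 1) (by omega)
    · simp only [getMinTransmittersLoop, getMinTransmittersAltLoop, if_neg hlt]

-- ===== VERDICT (by name: the statement is the Claim_ definition above) =====
theorem getMinTransmitters_spec : Claim_equal_getMinTransmitters := by
  intro x n k _ hpre
  unfold Spec_getMinTransmitters getMinTransmitters getMinTransmitters_alt
  rcases hpre.2 with h | hk
  · subst h
    simp [getMinTransmittersLoop, getMinTransmittersAltLoop]
  · exact loops_eq x k hpre.1 hk (x.length + 1) 0 0 (by omega)
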